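-- pv_equiv track=rewrite | github.com/shivamn05/y1_cs1010x | recitations/recitation_2/cards/cards.py | num_triangles
-- ===== SOURCE A (Python) =====
-- def num_triangles(h):
--     # base case of height 1
--     if h == 1:
--         return 0
--     if h == 2:
--         return 2
--     else:
--         # for upside down triangles
--         if h % 2 == 0:
--             final = 1
--             curr = 1
--             add_to = 0
--             for i in range(h//2-1):
--                 add_to =  5 + 4*i
--                 curr = curr + add_to
--                 final = final + curr
--         else:
--             final = 3
--             curr = 3
--             add_to = 0
--             for i in range(h//2-1):
--                 add_to = 7 + 4*i
--                 curr = curr + add_to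
--                 final = final + curr
--         # for normal triangles
--         upside_final = 1
--         upside_curr = 1
--         for i in range(h-2):
--             upside_curr = upside_curr + 2 + i*1
--             upside_final = upside_final + upside_curr
--     return final + upside_final
-- ===== SOURCE B (Python) =====
-- def num_triangles(h):
--     # Closed-form polynomial formulas instead of A's O(h) accumulation loops.
--     if h == 1:
--         return 0
--     if h == 2:
--         return 2
--     n = max(h // 2 - 1, 0)
--     m = max(h - 2, 0)
--     if h % 2 == 0:
--         down = 1 + n * (4 * n * n + 15 * n + 17) // 6
--     else:
--         down = 3 + n * (4 * n * n + 21 * n + 35) // 6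
--     up = (m + 1) * (m + 2) * (m + 3) // 6
--     return down + up
-- ===== Notes on version B (the rewrite author's own statement) =====
-- stated objective: faster
-- what changed: Replaced A's three O(h) accumulation loops by closed-form polynomial summation formulas for each parity branch, computed in O(1).
import Mathlib
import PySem

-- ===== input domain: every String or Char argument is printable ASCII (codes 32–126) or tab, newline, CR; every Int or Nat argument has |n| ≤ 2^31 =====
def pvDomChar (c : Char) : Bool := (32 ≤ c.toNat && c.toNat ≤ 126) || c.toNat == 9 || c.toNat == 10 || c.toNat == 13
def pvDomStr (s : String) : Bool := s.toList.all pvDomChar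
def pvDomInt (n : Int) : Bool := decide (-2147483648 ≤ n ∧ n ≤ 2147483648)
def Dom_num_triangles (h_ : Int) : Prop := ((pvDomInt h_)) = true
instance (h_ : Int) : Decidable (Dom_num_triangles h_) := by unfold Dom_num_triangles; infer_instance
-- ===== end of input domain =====

-- B replaces A's three accumulation loops by closed-form polynomial formulas (O(1) instead of O(h)).

-- ===== PORT A =====
-- loop body of A's even branch: add_to = 5 + 4*i; curr += add_to; final += curr
def pvStepE (s : Int × Int × Int) (i : Int) : Int × Int × Int :=
  let add_to := 5 + 4 * i
  let curr := s.2.1 + add_to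
  let final := s.1 + curr
  (final, curr, add_to)

-- loop body of A's odd branch: add_to = 7 + 4*i; curr += add_to; final += curr
def pvStepO (s : Int × Int × Int) (i : Int) : Int × Int × Int :=
  let add_to := 7 + 4 * i
  let curr := s.2.1 + add_to
  let final := s.1 + curr
  (final, curr, add_to)

-- loop body of A's "normal triangles" loop
def pvStepU (s : Int × Int) (i : Int) : Int × Int :=
  let upside_curr := s.2 + 2 + i * 1
  let upside_final := s.1 + upside_curr
  (upside_final, upside_curr)

def num_triangles (h_ : Int) : Int :=
  if h_ == 1 then 0
  else if h_ == 2 then 2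
  else
    let down :=
      if PySem.Int.mod h_ 2 == 0 then
        (PySem.List.pyRange 0 (PySem.Int.floordiv h_ 2 - 1) 1).foldl pvStepE ((1 : Int), (1 : Int), (0 : Int))
      else
        (PySem.List.pyRange 0 (PySem.Int.floordiv h_ 2 - 1) 1).foldl pvStepO ((3 : Int), (3 : Int), (0 : Int))
    let up :=
      (PySem.List.pyRange 0 (h_ - 2) 1).foldl pvStepU ((1 : Int), (1 : Int))
    down.1 + up.1

-- ===== PORT B =====
def num_triangles_alt (h_ : Int) : Int :=
  if h_ == 1 then 0
  else if h_ == 2 then 2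
  else
    let n := max (PySem.Int.floordiv h_ 2 - 1) 0
    let m := max (h_ - 2) 0
    let down :=
      if PySem.Int.mod h_ 2 == 0 then 1 + PySem.Int.floordiv (n * (4 * n * n + 15 * n + 17)) 6
      else 3 + PySem.Int.floordiv (n * (4 * n * n + 21 * n + 35)) 6
    let up := PySem.Int.floordiv ((m + 1) * (m + 2) * (m + 3)) 6
    down + up

-- ===== PRECONDITION & SPEC =====
def Spec_num_triangles (h_ : Int) (out : Int) : Prop := out = num_triangles_alt h_
instance (h_ : Int) (out : Int) : Decidable (Spec_num_triangles h_ out) := by unfold Spec_num_triangles; infer_instance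

-- ===== CLAIM (what is proved, stated in full; the proofs are below) =====
def Claim_equal_num_triangles : Prop := ∀ (h_ : Int), Dom_num_triangles h_ → Spec_num_triangles h_ (num_triangles h_)

-- ===== LEMMAS AND PROOFS =====

theorem pv_evenFold (n : Nat) :
    6 * ((PySem.List.pyRange 0 (n : Int) 1).foldl pvStepE ((1 : Int), (1 : Int), (0 : Int))).1
      = 6 + (n : Int) * (4 * n * n + 15 * n + 17) ∧
    ((PySem.List.pyRange 0 (n : Int) 1).foldl pvStepE ((1 : Int), (1 : Int), (0 : Int))).2.1
      = 2 * (n : Int) * n + 3 * n + 1 := by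
  induction n with
  | zero => simp
  | succ k ih =>
    obtain ⟨ih1, ih2⟩ := ih
    have hc : ((k + 1 : Nat) : Int) = (k : Int) + 1 := by push_cast; ring
    rw [hc, PySem.List.pyRange_one_succ_right (Int.natCast_nonneg k), List.foldl_append]
    simp only [List.foldl, pvStepE]
    constructor
    · linear_combination ih1 + 6 * ih2
    · linear_combination ih2

theorem pv_oddFold (n : Nat) :
    6 * ((PySem.List.pyRange 0 (n : Int) 1).foldl pvStepO ((3 : Int), (3 : Int), (0 : Int))).1
      = 18 + (n : Int) * (4 * n * n + 21 * n + 35) ∧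
    ((PySem.List.pyRange 0 (n : Int) 1).foldl pvStepO ((3 : Int), (3 : Int), (0 : Int))).2.1
      = 2 * (n : Int) * n + 5 * n + 3 := by
  induction n with
  | zero => simp
  | succ k ih =>
    obtain ⟨ih1, ih2⟩ := ih
    have hc : ((k + 1 : Nat) : Int) = (k : Int) + 1 := by push_cast; ring
    rw [hc, PySem.List.pyRange_one_succ_right (Int.natCast_nonneg k), List.foldl_append]
    simp only [List.foldl, pvStepO]
    constructor
    · linear_combination ih1 + 6 * ih2
    · linear_combination ih2

theorem pv_upFold (n : Nat) :
    6 * ((PySem.List.pyRange 0 (n : Int) 1).foldl pvStepU ((1 : Int), (1 : Int))).1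
      = ((n : Int) + 1) * (n + 2) * (n + 3) ∧
    2 * ((PySem.List.pyRange 0 (n : Int) 1).foldl pvStepU ((1 : Int), (1 : Int))).2
      = (n : Int) * n + 3 * n + 2 := by
  induction n with
  | zero => simp
  | succ k ih =>
    obtain ⟨ih1, ih2⟩ := ih
    have hc : ((k + 1 : Nat) : Int) = (k : Int) + 1 := by push_cast; ring
    rw [hc, PySem.List.pyRange_one_succ_right (Int.natCast_nonneg k), List.foldl_append]
    simp only [List.foldl, pvStepU]
    constructor
    · linear_combination ih1 + 3 * ih2
    · linear_combination ih2

-- ===== VERDICT (by name: the statement is the Claim_ definition above) =====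
theorem num_triangles_spec : Claim_equal_num_triangles := by
  intro h_ _
  unfold Spec_num_triangles num_triangles num_triangles_alt
  by_cases h1 : h_ = 1
  · simp [h1]
  by_cases h2 : h_ = 2
  · simp [h2]
  simp only [beq_iff_eq, h1, h2, if_false]
  by_cases h3 : 3 ≤ h_
  · -- the loops run; use the closed forms
    have hq : 1 ≤ PySem.Int.floordiv h_ 2 :=
      (PySem.Int.le_floordiv_iff_mul_le (by norm_num)).2 (by omega)
    set q := PySem.Int.floordiv h_ 2
    have hn : q - 1 = ((q - 1).toNat : Int) := by omega
    have hm : h_ - 2 = (((h_ - 2).toNat : Nat) : Int) := by omega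
    have hmax1 : max (q - 1) 0 = q - 1 := by omega
    have hmax2 : max (h_ - 2) 0 = h_ - 2 := by omega
    obtain ⟨hu1, -⟩ := pv_upFold (h_ - 2).toNat
    rw [← hm] at hu1
    rw [hmax1, hmax2]
    by_cases hpar : PySem.Int.mod h_ 2 = 0
    · rw [if_pos hpar, if_pos hpar]
      obtain ⟨he1, -⟩ := pv_evenFold (q - 1).toNat
      rw [← hn] at he1
      rw [PySem.Int.floordiv_eq_ediv_of_pos (by norm_num : (0:Int) < 6),
          PySem.Int.floordiv_eq_ediv_of_pos (by norm_num : (0:Int) < 6)]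
      generalize hP : (q - 1) * (4 * (q - 1) * (q - 1) + 15 * (q - 1) + 17) = P at he1 ⊢
      generalize hQ : (h_ - 2 + 1) * (h_ - 2 + 2) * (h_ - 2 + 3) = Q at hu1 ⊢
      omega
    · rw [if_neg hpar, if_neg hpar]
      obtain ⟨ho1, -⟩ := pv_oddFold (q - 1).toNat
      rw [← hn] at ho1
      rw [PySem.Int.floordiv_eq_ediv_of_pos (by norm_num : (0:Int) < 6),
          PySem.Int.floordiv_eq_ediv_of_pos (by norm_num : (0:Int) < 6)]
      generalize hP : (q - 1) * (4 * (q - 1) * (q - 1) + 21 * (q - 1) + 35) = P at ho1 ⊢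
      generalize hQ : (h_ - 2 + 1) * (h_ - 2 + 2) * (h_ - 2 + 3) = Q at hu1 ⊢
      omega
  · -- h_ ≤ 0: every range is empty and B's max clamps both loop counts to 0
    have hq : PySem.Int.floordiv h_ 2 < 1 :=
      (PySem.Int.floordiv_lt_iff_lt_mul (by norm_num)).2 (by omega)
    rw [PySem.List.pyRange_one_eq_nil (by omega),
        PySem.List.pyRange_one_eq_nil (by omega)]
    have hmax1 : max (PySem.Int.floordiv h_ 2 - 1) 0 = 0 := by omega
    have hmax2 : max (h_ - 2) 0 = 0 := by omega
    rw [hmax1, hmax2]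
    by_cases hpar : PySem.Int.mod h_ 2 = 0
    · rw [if_pos hpar, if_pos hpar]
      norm_num [PySem.Int.floordiv_eq_ediv_of_pos (by norm_num : (0:Int) < 6)]
    · rw [if_neg hpar, if_neg hpar]
      norm_num [PySem.Int.floordiv_eq_ediv_of_pos (by norm_num : (0:Int) < 6)]
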